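-- pv_equiv track=rewrite | github.com/anacardells/Codility | Year_of_the_rabbit/Solution.py | solution
-- ===== SOURCE A (Python) =====
-- def solution(A, B):
--     N = len(A)
--     Index_B = list(range(N))
--
--     for pos in range(N):
--         Found = True
--         for i in range(N):
--             if A[i] == B[Index_B[i]]:
--                 Found = False
--                 break
--         if Found:
--             return (pos)
--         Index_B = [Index_B[-1]] + Index_B[:-1]
--     return (-1)
-- ===== SOURCE B (Python) =====
-- def solution(A, B):
--     N = len(A)
--     bad = set()
--     for i in range(N):
--         for j in range(N):
--             if A[i] == B[j]:
--                 bad.add((i - j) % N)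
--     for pos in range(N):
--         if pos not in bad:
--             return pos
--     return -1
-- ===== Notes on version B (the rewrite author's own statement) =====
-- stated objective: alternative
-- what changed: Instead of testing each rotation by rotating an index list and rescanning (A), B makes one marking pass over all pairs (i,j) collecting the set of 'bad' offsets (i-j)%N where A[i]==B[j], then returns the first offset in range(N) not in that set.
import Mathlib
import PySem

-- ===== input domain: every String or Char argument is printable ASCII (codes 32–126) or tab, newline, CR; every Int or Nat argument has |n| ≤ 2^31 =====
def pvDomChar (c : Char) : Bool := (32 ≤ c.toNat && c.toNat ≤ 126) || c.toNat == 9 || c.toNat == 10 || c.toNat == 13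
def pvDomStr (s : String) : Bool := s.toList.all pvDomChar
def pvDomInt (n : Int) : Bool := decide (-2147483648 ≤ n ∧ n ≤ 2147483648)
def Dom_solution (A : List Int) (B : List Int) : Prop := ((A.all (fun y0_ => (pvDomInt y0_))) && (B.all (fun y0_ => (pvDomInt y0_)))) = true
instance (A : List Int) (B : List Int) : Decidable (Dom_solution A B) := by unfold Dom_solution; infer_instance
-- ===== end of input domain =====

-- B replaces A's rotate-and-rescan of the index list by one marking pass over all (i,j) pairs
-- collecting the set of bad offsets (i-j)%N, then a scan for the first offset not in it (alternative).

-- ===== PORT A =====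
-- Found flag of one pass: all indices are in range under Pre_solution, ported with pyGetD (default unreachable there)
def solFound (A : List Int) (B : List Int) (IdxB : List Int) : Bool :=
  (PySem.List.pyRange 0 A.length 1).all
    (fun i => !(PySem.List.pyGetD A i 0 == PySem.List.pyGetD B (PySem.List.pyGetD IdxB i 0) 0))

-- the 'for pos in range(N)' loop carrying Index_B; '[Index_B[-1]] + Index_B[:-1]' via pyGetD (-1) and [:-1] = dropLast
def solGo (A : List Int) (B : List Int) (IdxB : List Int) : List Int → Int
  | [] => -1
  | pos :: rest =>
    if solFound A B IdxB then pos
    else solGo A B (PySem.List.pyGetD IdxB (-1) 0 :: PySem.List.slice IdxB none (some (-1))) rest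

def solution (A : List Int) (B : List Int) : Int :=
  solGo A B (PySem.List.pyRange 0 A.length 1) (PySem.List.pyRange 0 A.length 1)

-- ===== PORT B =====
def altBad (A : List Int) (B : List Int) : PySem.Set Int :=
  (PySem.List.pyRange 0 A.length 1).foldl (fun s i =>
    (PySem.List.pyRange 0 A.length 1).foldl (fun s j =>
      if PySem.List.pyGetD A i 0 == PySem.List.pyGetD B j 0
      then PySem.Set.add s (PySem.Int.mod (i - j) A.length)
      else s) s)
    PySem.Set.empty

def altScan (bad : PySem.Set Int) : List Int → Int
  | [] => -1
  | p :: rest => if PySem.Set.contains bad p then altScan bad rest else p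

def solution_alt (A : List Int) (B : List Int) : Int :=
  altScan (altBad A B) (PySem.List.pyRange 0 A.length 1)

-- ===== PRECONDITION & SPEC =====
-- Pre_ excludes exactly the inputs where Python A raises IndexError (B[Index_B[i]] with len(B) < len(A)):
-- whenever len(B) < len(A), every run of A reaches an out-of-range index before it can return.
def Pre_solution (A : List Int) (B : List Int) : Prop := A.length ≤ B.length
instance (A : List Int) (B : List Int) : Decidable (Pre_solution A B) := by unfold Pre_solution; infer_instance
def pvWitness_solution : List Int × List Int := ([1, 2, 3], [3, 1, 2])

def Spec_solution (A : List Int) (B : List Int) (out : Int) : Prop := out = solution_alt A B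
instance (A : List Int) (B : List Int) (out : Int) : Decidable (Spec_solution A B out) := by unfold Spec_solution; infer_instance

-- ===== CLAIM (what is proved, stated in full; the proofs are below) =====
def Claim_equal_solution : Prop := ∀ (A : List Int) (B : List Int), Dom_solution A B → Pre_solution A B → Spec_solution A B (solution A B)

-- ===== LEMMAS AND PROOFS =====

-- the index list after k rotations: entry i is (i - k) % N
def rotIdx (N : Nat) (k : Int) : List Int :=
  (List.range N).map (fun (i : Nat) => PySem.Int.mod ((i : Int) - k) (N : Int))

theorem rotIdx_zero (N : Nat) : PySem.List.pyRange 0 (N : Int) 1 = rotIdx N 0 := by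
  rw [PySem.List.pyRange_one]
  apply List.ext_getElem
  · simp [rotIdx]
  · intro n h1 h2
    simp only [rotIdx, List.getElem_map, List.getElem_range]
    have hn : n < N := by simpa [rotIdx] using h2
    have hN : (0:Int) < (N:Int) := by omega
    rw [sub_zero, PySem.Int.mod_eq_emod_of_pos hN, Int.emod_eq_of_lt (by omega) (by exact_mod_cast hn)]
    omega

theorem rotIdx_succ (N : Nat) (hN : 0 < N) (k : Int) :
    PySem.List.pyGetD (rotIdx N k) (-1) 0 :: PySem.List.slice (rotIdx N k) none (some (-1))
      = rotIdx N (k + 1) := by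
  have hne : rotIdx N k ≠ [] := by simp [rotIdx, List.range_eq_nil]; omega
  rw [PySem.List.slice_to_neg_one, PySem.List.pyGetD_neg_one _ _ hne]
  apply List.ext_getElem
  · simp [rotIdx, List.length_dropLast]; omega
  · intro n h1 h2
    have hlen : (rotIdx N (k+1)).length = N := by simp [rotIdx]
    have hn : n < N := by omega
    have hNZ : (0:Int) < (N:Int) := by omega
    rcases Nat.eq_zero_or_pos n with rfl | hpos
    · simp only [List.getElem_cons_zero]
      rw [List.getLast_eq_getElem]
      simp only [rotIdx, List.getElem_map, List.getElem_range, List.length_map, List.length_range]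
      rw [PySem.Int.mod_eq_emod_of_pos hNZ, PySem.Int.mod_eq_emod_of_pos hNZ]
      have : ((N - 1 : Nat) : Int) - k = (0 - (k+1)) + N := by omega
      rw [this, Int.add_emod_right]
      norm_num
    · obtain ⟨m, rfl⟩ := Nat.exists_eq_add_of_lt hpos
      simp only [Nat.zero_add, List.getElem_cons_succ]
      rw [List.getElem_dropLast]
      simp only [rotIdx, List.getElem_map, List.getElem_range]
      congr 1
      push_cast
      ring

theorem mod_swap_aux {N i j p : Int} (hN : 0 < N) (hp0 : 0 ≤ p) (hp : p < N)
    (h : PySem.Int.mod (i - p) N = j) : PySem.Int.mod (i - j) N = p := by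
  rw [PySem.Int.mod_eq_emod_of_pos hN] at h ⊢
  subst h
  have h1 : (i - (i - p) % N) % N = (i - (i - p)) % N := by
    conv_lhs => rw [Int.sub_emod]
    rw [Int.emod_emod_of_dvd _ dvd_rfl, ← Int.sub_emod]
  rw [h1, show i - (i - p) = p by ring, Int.emod_eq_of_lt hp0 hp]

theorem mod_swap {N i j p : Int} (hN : 0 < N) (hj0 : 0 ≤ j) (hj : j < N) (hp0 : 0 ≤ p) (hp : p < N) :
    PySem.Int.mod (i - p) N = j ↔ PySem.Int.mod (i - j) N = p :=
  ⟨mod_swap_aux hN hp0 hp, mod_swap_aux hN hj0 hj⟩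

theorem mem_foldl_add_if {l : List Int} {s : PySem.Set Int} {c : Int → Bool} {g : Int → Int} {x : Int} :
    x ∈ l.foldl (fun s j => if c j then PySem.Set.add s (g j) else s) s
      ↔ x ∈ s ∨ ∃ j ∈ l, c j ∧ g j = x := by
  induction l generalizing s with
  | nil => simp
  | cons a t ih =>
    simp only [List.foldl_cons, List.mem_cons]
    by_cases h : c a
    · simp only [h, if_true, ih, PySem.Set.mem_add]
      constructor
      · rintro ((hx|hx)|⟨j, hj, hc, hg⟩)
        · exact Or.inl hx
        · exact Or.inr ⟨a, Or.inl rfl, h, hx.symm⟩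
        · exact Or.inr ⟨j, Or.inr hj, hc, hg⟩
      · rintro (hx | ⟨j, (rfl|hj), hc, hg⟩)
        · exact Or.inl (Or.inl hx)
        · exact Or.inl (Or.inr hg.symm)
        · exact Or.inr ⟨j, hj, hc, hg⟩
    · simp only [h, if_false, ih, Bool.false_eq_true]
      constructor
      · rintro (hx | ⟨j, hj, hc, hg⟩)
        · exact Or.inl hx
        · exact Or.inr ⟨j, Or.inr hj, hc, hg⟩
      · rintro (hx | ⟨j, (rfl|hj), hc, hg⟩)
        · exact Or.inl hx
        · exact absurd hc h
        · exact Or.inr ⟨j, hj, hc, hg⟩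

theorem mem_foldl_outer {lo li : List Int} {s : PySem.Set Int} {c : Int → Int → Bool} {g : Int → Int → Int} {x : Int} :
    x ∈ lo.foldl (fun s i => li.foldl (fun s j => if c i j then PySem.Set.add s (g i j) else s) s) s
      ↔ x ∈ s ∨ ∃ i ∈ lo, ∃ j ∈ li, c i j ∧ g i j = x := by
  induction lo generalizing s with
  | nil => simp
  | cons a t ih =>
    simp only [List.foldl_cons, ih, mem_foldl_add_if, List.mem_cons]
    constructor
    · rintro ((hx|⟨j,hj,hc,hg⟩)|⟨i,hi,rest⟩)
      · exact Or.inl hx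
      · exact Or.inr ⟨a, Or.inl rfl, j, hj, hc, hg⟩
      · exact Or.inr ⟨i, Or.inr hi, rest⟩
    · rintro (hx|⟨i,(rfl|hi),rest⟩)
      · exact Or.inl (Or.inl hx)
      · exact Or.inl (Or.inr rest)
      · exact Or.inr ⟨i, hi, rest⟩

theorem rotIdx_getD (N : Nat) (k i : Int) (h0 : 0 ≤ i) (hi : i < (N : Int)) :
    PySem.List.pyGetD (rotIdx N k) i 0 = PySem.Int.mod (i - k) (N : Int) := by
  rw [PySem.List.pyGetD_eq_getElem _ _ h0 (by simp [rotIdx]; omega)]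
  simp only [rotIdx, List.getElem_map, List.getElem_range]
  congr 1
  omega

theorem mem_altBad {A B : List Int} {x : Int} :
    x ∈ altBad A B ↔ ∃ i ∈ PySem.List.pyRange 0 A.length 1, ∃ j ∈ PySem.List.pyRange 0 A.length 1,
      (PySem.List.pyGetD A i 0 == PySem.List.pyGetD B j 0) = true ∧ PySem.Int.mod (i - j) A.length = x := by
  unfold altBad
  rw [mem_foldl_outer]
  simp [PySem.Set.empty]

theorem found_iff_not_bad (A B : List Int) (k : Int) (hk0 : 0 ≤ k) (hk : k < (A.length : Int)) :
    solFound A B (rotIdx A.length k) = !(PySem.Set.contains (altBad A B) k) := by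
  have hN : (0:Int) < (A.length : Int) := by omega
  have key : (PySem.Set.contains (altBad A B) k = true) ↔ (solFound A B (rotIdx A.length k) = false) := by
    rw [PySem.Set.contains_iff, mem_altBad]
    unfold solFound
    rw [List.all_eq_false]
    constructor
    · rintro ⟨i, hi, j, hj, hc, hg⟩
      rw [PySem.List.mem_pyRange_one] at hj
      refine ⟨i, hi, ?_⟩
      rw [rotIdx_getD _ _ _ (by rw [PySem.List.mem_pyRange_one] at hi; omega)
            (by rw [PySem.List.mem_pyRange_one] at hi; omega)]
      rw [(mod_swap hN hj.1 hj.2 hk0 hk).mpr hg]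
      simp [hc]
    · rintro ⟨i, hi, hfail⟩
      have hi' := (PySem.List.mem_pyRange_one).mp hi
      rw [rotIdx_getD _ _ _ (by omega) (by omega)] at hfail
      set j := PySem.Int.mod (i - k) (A.length : Int) with hjdef
      have hj0 : 0 ≤ j := PySem.Int.mod_nonneg _ hN
      have hjlt : j < (A.length : Int) := PySem.Int.mod_lt _ hN
      refine ⟨i, hi, j, PySem.List.mem_pyRange_one.mpr ⟨hj0, hjlt⟩, ?_, ?_⟩
      · simpa using hfail
      · exact (mod_swap hN hj0 hjlt hk0 hk).mp rfl
  cases hcb : PySem.Set.contains (altBad A B) k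
  · simp only [Bool.not_false]
    rcases Bool.eq_false_or_eq_true (solFound A B (rotIdx A.length k)) with h | h
    · exact h
    · have h2 := key.mpr h
      rw [hcb] at h2
      exact absurd h2 (by simp)
  · simp only [Bool.not_true]
    exact key.mp hcb

theorem go_eq_scan (A B : List Int) (d : Nat) :
    ∀ k : Nat, k + d = A.length →
      solGo A B (rotIdx A.length (k : Int)) (PySem.List.pyRange (k : Int) (A.length : Int) 1)
        = altScan (altBad A B) (PySem.List.pyRange (k : Int) (A.length : Int) 1) := by
  induction d with
  | zero =>
    intro k hk
    rw [PySem.List.pyRange_one_eq_nil (by omega)]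
    rfl
  | succ d ih =>
    intro k hk
    have hklt : (k:Int) < (A.length:Int) := by omega
    rw [PySem.List.pyRange_one_cons hklt]
    simp only [solGo, altScan]
    rw [found_iff_not_bad A B (k:Int) (by omega) hklt]
    cases hc : PySem.Set.contains (altBad A B) (k:Int)
    · simp
    · norm_num
      rw [rotIdx_succ A.length (by omega) (k:Int)]
      have h1 : ((k:Int) + 1) = ((k+1 : Nat) : Int) := by push_cast; ring
      rw [h1]
      exact ih (k+1) (by omega)

-- ===== VERDICT (by name: the statement is the Claim_ definition above) =====
theorem solution_spec : Claim_equal_solution := by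
  intro A B _ _
  unfold Spec_solution solution solution_alt
  have h := go_eq_scan A B A.length 0 (by simp)
  simp only [Nat.cast_zero] at h
  rw [← rotIdx_zero] at h
  exact h
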